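-- pv_equiv track=rewrite | github.com/TheNitromeFan/baekjoon | 07550.py | parse
-- ===== SOURCE A (Python) =====
-- import string
--
-- def parse(line):
--     words = []
--     word = ""
--     for c in line:
--         if c in string.ascii_letters:
--             word += c
--         else:
--             if word:
--                 words.append(word)
--             word = ""
--     if word:
--         words.append(word)
--     return words
-- ===== SOURCE B (Python) =====
-- import string
-- from itertools import groupby
--
-- def parse(line):
--     return [''.join(g) for k, g in groupby(line, key=lambda c: c in string.ascii_letters) if k]
-- ===== Notes on version B (the rewrite author's own statement) =====
-- stated objective: idiomatic
-- what changed: Replaced the explicit accumulate-and-flush state machine with itertools.groupby over the letter/non-letter predicate, joining and keeping the letter runs.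
import Mathlib
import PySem

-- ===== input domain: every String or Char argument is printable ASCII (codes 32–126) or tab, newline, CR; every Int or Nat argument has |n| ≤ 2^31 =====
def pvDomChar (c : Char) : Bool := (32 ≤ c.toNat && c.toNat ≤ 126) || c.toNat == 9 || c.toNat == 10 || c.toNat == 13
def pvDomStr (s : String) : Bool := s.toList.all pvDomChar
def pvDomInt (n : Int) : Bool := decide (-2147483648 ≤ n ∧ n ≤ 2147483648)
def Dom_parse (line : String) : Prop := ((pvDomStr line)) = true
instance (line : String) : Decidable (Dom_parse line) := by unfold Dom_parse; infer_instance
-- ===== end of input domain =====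

-- B replaces A's accumulate-and-flush state machine with run-grouping (groupby on the
-- ASCII-letter predicate) followed by keep-and-join of the letter runs; objective: idiomatic.


-- ===== PORT A =====
-- c in string.ascii_letters  (shared membership test, exact on all Chars)
def isAsciiLetter (c : Char) : Bool :=
  c ∈ "abcdefghijklmnopqrstuvwxyzABCDEFGHIJKLMNOPQRSTUVWXYZ".toList

-- one iteration of A's for-loop over the state (words, word)
def parseStepA (st : List (List Char) × List Char) (c : Char) : List (List Char) × List Char :=
  if isAsciiLetter c then (st.1, st.2 ++ [c])
  else if st.2 ≠ [] then (st.1 ++ [st.2], []) else (st.1, [])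

-- the trailing 'if word: words.append(word)'
def flushA (st : List (List Char) × List Char) : List (List Char) :=
  if st.2 ≠ [] then st.1 ++ [st.2] else st.1

def parse (line : String) : List String :=
  (flushA (line.toList.foldl parseStepA ([], []))).map String.ofList

-- ===== PORT B =====
-- groupby(line, key = letter?) with only the key=True groups kept: take a letter run,
-- skip past it, recurse; non-letter characters head no kept group.
def letterRuns : List Char → List (List Char)
  | [] => []
  | c :: cs =>
    if isAsciiLetter c then
      (c :: cs.takeWhile isAsciiLetter) :: letterRuns (cs.dropWhile isAsciiLetter)
    else letterRuns cs
termination_by cs => cs.length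
decreasing_by
  · simpa using Nat.lt_succ_of_le (List.length_dropWhile_le _ _)
  · simp

def parse_alt (line : String) : List String :=
  (letterRuns line.toList).map String.ofList

-- ===== PRECONDITION & SPEC =====
def Spec_parse (line : String) (out : List String) : Prop := out = parse_alt line
instance (line : String) (out : List String) : Decidable (Spec_parse line out) := by unfold Spec_parse; infer_instance

-- ===== CLAIM (what is proved, stated in full; the proofs are below) =====
def Claim_equal_parse : Prop := ∀ (line : String), Dom_parse line → Spec_parse line (parse line)

-- ===== LEMMAS AND PROOFS =====

-- what A's flushed loop computes when started with words = acc, word = w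
def runsFrom (w : List Char) (cs : List Char) : List (List Char) :=
  if w = [] then letterRuns cs
  else (w ++ cs.takeWhile isAsciiLetter) :: letterRuns (cs.dropWhile isAsciiLetter)

theorem flush_foldl (cs : List Char) : ∀ (acc : List (List Char)) (w : List Char),
    flushA (cs.foldl parseStepA (acc, w)) = acc ++ runsFrom w cs := by
  induction cs with
  | nil =>
    intro acc w
    by_cases hw : w = [] <;> simp [flushA, runsFrom, hw, letterRuns]
  | cons c cs ih =>
    intro acc w
    by_cases hc : isAsciiLetter c
    · have : parseStepA (acc, w) c = (acc, w ++ [c]) := by simp [parseStepA, hc]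
      rw [List.foldl_cons, this, ih]
      by_cases hw : w = [] <;>
        simp [runsFrom, hw, hc, letterRuns]
    · by_cases hw : w = []
      · have : parseStepA (acc, w) c = (acc, []) := by simp [parseStepA, hc, hw]
        rw [List.foldl_cons, this, ih]
        simp [runsFrom, hw, letterRuns, hc]
      · have : parseStepA (acc, w) c = (acc ++ [w], []) := by simp [parseStepA, hc, hw]
        rw [List.foldl_cons, this, ih]
        simp [runsFrom, hw, letterRuns, hc]

-- ===== VERDICT (by name: the statement is the Claim_ definition above) =====
theorem parse_spec : Claim_equal_parse := by
  intro line _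
  unfold Spec_parse parse parse_alt
  rw [flush_foldl]
  simp [runsFrom]
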